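-- pv_equiv track=rewrite | github.com/JuusoSaavalainen/Advent_of_Code | Calendar_2023/day1/day1_part2.py | find_substrings_with_integers
-- ===== SOURCE A (Python) =====
-- def find_substrings_with_integers(string):
--     substring_mapping = {
--         "one": 1, "two": 2, "three": 3, "four": 4, "five": 5,
--         "six": 6, "seven": 7, "eight": 8, "nine": 9,
--         "1": 1, "2": 2, "3": 3, "4": 4, "5": 5,
--         "6": 6, "7": 7, "8": 8, "9": 9
--     }
--     substrings = ["one", "two", "three", "four", "five", "six",
--                   "seven", "eight", "nine", "1", "2", "3", "4",
--                   "5", "6", "7", "8", "9"]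
--     positions = []
--     for substring in substrings:
--         start = 0
--         while start != -1:
--             start = string.find(substring, start)
--             if start != -1:
--                 positions.append((start, substring_mapping[substring]))
--                 start += 1
--
--     positions.sort()
--     result = ''.join(str(integer) for _, integer in positions)
--     return result
-- ===== SOURCE B (Python) =====
-- def find_substrings_with_integers(string):
--     patterns = [("one", 1), ("two", 2), ("three", 3), ("four", 4), ("five", 5),
--                 ("six", 6), ("seven", 7), ("eight", 8), ("nine", 9),
--                 ("1", 1), ("2", 2), ("3", 3), ("4", 4), ("5", 5),
--                 ("6", 6), ("7", 7), ("8", 8), ("9", 9)]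
--     out = []
--     for i in range(len(string)):
--         for pat, d in patterns:
--             if string.startswith(pat, i):
--                 out.append(str(d))
--                 break
--     return ''.join(out)
-- ===== Notes on version B (the rewrite author's own statement) =====
-- stated objective: simpler
-- what changed: B makes a single left-to-right pass over the string, emitting the digit for the unique pattern (no pattern is a prefix of another) matching at each index, instead of A's per-pattern repeated find() scans collecting (position, value) pairs followed by a sort and join.
import Mathlib
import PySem

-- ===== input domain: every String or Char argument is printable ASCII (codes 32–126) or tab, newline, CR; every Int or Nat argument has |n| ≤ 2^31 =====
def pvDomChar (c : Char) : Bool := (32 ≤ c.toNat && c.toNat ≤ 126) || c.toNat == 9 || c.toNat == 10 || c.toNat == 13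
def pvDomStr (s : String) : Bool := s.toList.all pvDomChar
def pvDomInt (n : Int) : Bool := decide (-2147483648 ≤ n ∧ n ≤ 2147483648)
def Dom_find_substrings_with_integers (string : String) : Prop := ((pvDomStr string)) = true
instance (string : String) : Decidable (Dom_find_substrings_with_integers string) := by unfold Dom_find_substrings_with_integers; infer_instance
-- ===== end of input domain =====

-- B re-implements the digit-word extraction as ONE positional pass (per-index pattern match,
-- no position list, no sort); equivalence holds because no pattern is a prefix of another.

-- ===== PORT A =====
def pvMapping : PySem.Dict (List Char) Int :=
  PySem.Dict.ofList
  [("one".toList, 1), ("two".toList, 2), ("three".toList, 3), ("four".toList, 4), ("five".toList, 5),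
   ("six".toList, 6), ("seven".toList, 7), ("eight".toList, 8), ("nine".toList, 9),
   ("1".toList, 1), ("2".toList, 2), ("3".toList, 3), ("4".toList, 4), ("5".toList, 5),
   ("6".toList, 6), ("7".toList, 7), ("8".toList, 8), ("9".toList, 9)]

def pvSubstrings : List (List Char) :=
  ["one".toList, "two".toList, "three".toList, "four".toList, "five".toList, "six".toList,
   "seven".toList, "eight".toList, "nine".toList, "1".toList, "2".toList, "3".toList, "4".toList,
   "5".toList, "6".toList, "7".toList, "8".toList, "9".toList]

-- A's inner while loop: repeated string.find(substring, start); fuel only makes it total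
-- (s.length + 2 iterations always suffice: start strictly increases and stays ≤ len).
def pvFindLoop (s sub : List Char) : Nat → Int → List (Int × Int) → List (Int × Int)
  | 0, _, acc => acc
  | fuel + 1, start, acc =>
    let f := PySem.Chars.findFrom s sub start none
    if f = -1 then acc
    else pvFindLoop s sub fuel (f + 1) (acc ++ [(f, PySem.Dict.getD pvMapping sub 0)])

def find_substrings_with_integers (string : String) : String :=
  let s := string.toList
  let positions := pvSubstrings.foldl (fun acc sub => pvFindLoop s sub (s.length + 2) 0 acc) []
  let sortedPos := PySem.List.sorted2 positions (fun p => p.1) (fun p => p.2)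
  String.ofList (PySem.Chars.join [] (sortedPos.map (fun p => PySem.Int.toChars p.2)))

-- ===== PORT B =====
def pvPatterns : List (List Char × Int) :=
  [("one".toList, 1), ("two".toList, 2), ("three".toList, 3), ("four".toList, 4), ("five".toList, 5),
   ("six".toList, 6), ("seven".toList, 7), ("eight".toList, 8), ("nine".toList, 9),
   ("1".toList, 1), ("2".toList, 2), ("3".toList, 3), ("4".toList, 4), ("5".toList, 5),
   ("6".toList, 6), ("7".toList, 7), ("8".toList, 8), ("9".toList, 9)]

-- Source B's inner 'for pat, d in patterns: if string.startswith(pat, i): … break'.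
-- string.startswith(pat, i) for 0 ≤ i ≤ len(string) is exactly startswith on the drop.
def pvFirstPat (s : List Char) (i : Nat) : List (List Char × Int) → Option Int
  | [] => none
  | p :: rest =>
    if PySem.Chars.startswith (List.drop i s) p.1 then some p.2 else pvFirstPat s i rest

def find_substrings_with_integers_alt (string : String) : String :=
  let s := string.toList
  let out := (List.range s.length).foldl (fun acc i =>
    match pvFirstPat s i pvPatterns with
    | some d => acc ++ PySem.Int.toChars d
    | none => acc) []
  String.ofList out

-- ===== PRECONDITION & SPEC =====
def Spec_find_substrings_with_integers (string : String) (out : String) : Prop := out = find_substrings_with_integers_alt string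
instance (string : String) (out : String) : Decidable (Spec_find_substrings_with_integers string out) := by unfold Spec_find_substrings_with_integers; infer_instance

-- ===== CLAIM (what is proved, stated in full; the proofs are below) =====
def Claim_equal_find_substrings_with_integers : Prop := ∀ (string : String), Dom_find_substrings_with_integers string → Spec_find_substrings_with_integers string (find_substrings_with_integers string)


-- ===== LEMMAS AND PROOFS =====

-- Proof-side abbreviations (on the underlying character list s of the input).
def pvVal (sub : List Char) : Int := PySem.Dict.getD pvMapping sub 0

def pvOcc (s sub : List Char) (k : Nat) : List Nat :=
  (List.range s.length).filter (fun i => k ≤ i && PySem.Chars.startswith (List.drop i s) sub)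

def pvGroup (s : List Char) (i : Nat) : List (Int × Int) :=
  (pvSubstrings.filter (fun sub => PySem.Chars.startswith (List.drop i s) sub)).map
    (fun sub => ((i : Int), pvVal sub))

def pvC (s : List Char) : List (Int × Int) := (List.range s.length).flatMap (pvGroup s)

-- Literal facts about the 18 patterns.
lemma pv_subs_ne_nil : ∀ sub ∈ pvSubstrings, sub ≠ [] := by decide

lemma pv_subs_nodup : pvSubstrings.Nodup := by decide

lemma pv_no_prefix : ∀ s1 ∈ pvSubstrings, ∀ s2 ∈ pvSubstrings,
    PySem.Chars.startswith s2 s1 = true → s1 = s2 := by decide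

lemma pv_patterns_eq : pvPatterns = pvSubstrings.map (fun sub => (sub, pvVal sub)) := by decide

-- At a given index at most one of the 18 patterns matches (none is a prefix of another).
lemma pv_unique_match (s : List Char) (i : Nat) :
    ∀ a ∈ pvSubstrings, ∀ b ∈ pvSubstrings,
      PySem.Chars.startswith (List.drop i s) a = true →
      PySem.Chars.startswith (List.drop i s) b = true → a = b := by
  intro a ha b hb hpa hpb
  rw [PySem.Chars.startswith_iff] at hpa hpb
  rcases List.prefix_or_prefix_of_prefix hpa hpb with h | h
  · exact pv_no_prefix a ha b hb ((PySem.Chars.startswith_iff _ _).mpr h)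
  · exact (pv_no_prefix b hb a ha ((PySem.Chars.startswith_iff _ _).mpr h)).symm

lemma pv_filter_single {α : Type} {l : List α} (p : α → Bool) (hN : l.Nodup)
    (h : ∀ a ∈ l, ∀ b ∈ l, p a = true → p b = true → a = b) :
    l.filter p = [] ∨ ∃ x, l.filter p = [x] := by
  induction l with
  | nil => exact Or.inl rfl
  | cons a l ih =>
    rcases List.nodup_cons.mp hN with ⟨hna, hN'⟩
    by_cases hpa : p a = true
    · right
      refine ⟨a, ?_⟩
      have hnil : l.filter p = [] := by
        rw [List.filter_eq_nil_iff]
        intro b hb hpb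
        exact hna (h a List.mem_cons_self b (List.mem_cons_of_mem _ hb) hpa hpb ▸ hb)
      simp [hpa, hnil]
    · have hpa' : p a = false := Bool.eq_false_iff.mpr hpa
      have := ih hN' (fun x hx y hy => h x (List.mem_cons_of_mem _ hx) y (List.mem_cons_of_mem _ hy))
      simpa [List.filter_cons, hpa'] using this

-- Generic: filtering a strictly increasing list whose minimal p-element is m.
lemma pv_filter_eq_cons_of_min {l : List Nat} (p q : Nat → Bool) (m : Nat)
    (hsorted : l.Pairwise (· < ·)) (hmem : m ∈ l) (hpm : p m = true)
    (hbelow : ∀ i ∈ l, p i = true → m ≤ i)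
    (hq : ∀ i ∈ l, q i = (p i && decide (i ≠ m))) :
    l.filter p = m :: l.filter q := by
  induction l with
  | nil => cases hmem
  | cons a l ih =>
    rcases List.pairwise_cons.mp hsorted with ⟨hlt, hsorted'⟩
    by_cases ham : a = m
    · subst ham
      have hfa : ∀ i ∈ l, q i = p i := by
        intro i hi
        have : i ≠ a := Nat.ne_of_gt (hlt i hi)
        simp [hq i (List.mem_cons_of_mem _ hi), this]
      have : l.filter q = l.filter p := List.filter_congr hfa
      simp [hpm, hq a List.mem_cons_self, this]
    · have hmem' : m ∈ l := by
        rcases List.mem_cons.mp hmem with h | h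
        · exact absurd h.symm ham
        · exact h
      have hpa : p a = false := by
        by_contra hpy
        have hma : m ≤ a := hbelow a List.mem_cons_self (by simpa using hpy)
        exact absurd (hlt m hmem') (by omega)
      have hqa : q a = false := by simp [hq a List.mem_cons_self, hpa]
      rw [List.filter_cons, List.filter_cons, hpa, hqa]
      simp only [Bool.false_eq_true, if_false]
      exact ih hsorted' hmem' (fun i hi hp => hbelow i (List.mem_cons_of_mem _ hi) hp)
        (fun i hi => hq i (List.mem_cons_of_mem _ hi))

lemma pvOcc_nil (s sub : List Char) (k : Nat)
    (hnone : ¬ sub <:+: List.drop k s) : pvOcc s sub k = [] := by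
  rw [pvOcc, List.filter_eq_nil_iff]
  intro i hi
  simp only [Bool.and_eq_true, decide_eq_true_eq, PySem.Chars.startswith_iff, not_and]
  intro hki hpre
  exact hnone (by
    have : List.drop i s = List.drop (i - k) (List.drop k s) := by
      rw [List.drop_drop]; congr 1; omega
    rw [this] at hpre
    exact hpre.isInfix.trans (List.drop_suffix _ _).isInfix)

lemma pvOcc_cons (s sub : List Char) (k m : Nat) (hk : k ≤ m) (hm : m < s.length)
    (hmatch : sub <+: List.drop m s)
    (hmin : ∀ i, k ≤ i → i < m → ¬ sub <+: List.drop i s) :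
    pvOcc s sub k = m :: pvOcc s sub (m + 1) := by
  apply pv_filter_eq_cons_of_min _ _ m List.pairwise_lt_range (List.mem_range.mpr hm)
  · simp [hk, PySem.Chars.startswith_iff, hmatch]
  · intro i _ hp
    simp only [Bool.and_eq_true, decide_eq_true_eq, PySem.Chars.startswith_iff] at hp
    by_contra hlt
    exact hmin i hp.1 (by omega) hp.2
  · intro i _
    by_cases hsw : PySem.Chars.startswith (List.drop i s) sub = true
    · rw [PySem.Chars.startswith_iff] at hsw
      by_cases hik : k ≤ i
      · have him : m ≤ i := by
          by_contra hlt
          exact hmin i hik (by omega) hsw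
        by_cases hieq : i = m <;>
          simp [hieq, PySem.Chars.startswith_iff, hsw, hik] <;> omega
      · simp [hik]
        omega
    · simp [hsw]

lemma pvFindLoop_spec (s sub : List Char) (hsub : sub ≠ []) :
    ∀ (fuel k : Nat) (acc : List (Int × Int)), k ≤ s.length → s.length + 1 - k < fuel →
    pvFindLoop s sub fuel (↑k) acc
      = acc ++ (pvOcc s sub k).map (fun (i : Nat) => ((i : Int), pvVal sub)) := by
  intro fuel
  induction fuel with
  | zero => intro k acc hk hfuel; omega
  | succ fuel ih =>
    intro k acc hk hfuel
    rw [pvFindLoop]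
    by_cases hf : PySem.Chars.findFrom s sub (↑k) none = -1
    · rw [if_pos hf]
      have : ¬ sub <:+: List.drop k s := (PySem.Chars.findFrom_natCast_eq_neg_one_iff s sub k hk).mp hf
      rw [pvOcc_nil s sub k this]
      simp
    · rw [if_neg hf]
      obtain ⟨hge, hpre, hmin⟩ := PySem.Chars.findFrom_natCast_spec s sub k hk hf
      set f := PySem.Chars.findFrom s sub (↑k) none with hfdef
      have hf0 : 0 ≤ f := le_trans (by exact_mod_cast Int.natCast_nonneg k) hge
      set m := f.toNat with hmdef
      have hfm : f = (↑m : Int) := (Int.toNat_of_nonneg hf0).symm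
      have hkm : k ≤ m := by omega
      have hmlt : m < s.length := by
        have hlen := hpre.length_le
        have hne : 0 < sub.length := List.length_pos_iff.mpr hsub
        rw [List.length_drop] at hlen
        omega
      have hstep : f + 1 = ((m + 1 : Nat) : Int) := by rw [hfm]; push_cast; ring
      rw [hstep, ih (m + 1) _ (by omega) (by omega)]
      rw [pvOcc_cons s sub k m hkm hmlt hpre (fun i h1 h2 => hmin i h1 h2)]
      simp [hfm, pvVal]

lemma pv_positions (s : List Char) :
    pvSubstrings.foldl (fun acc sub => pvFindLoop s sub (s.length + 2) 0 acc) []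
      = pvSubstrings.flatMap (fun sub => (pvOcc s sub 0).map (fun (i : Nat) => ((i : Int), pvVal sub))) := by
  have h1 := PySem.List.foldl_congr_mem (l := pvSubstrings)
    (init := ([] : List (Int × Int)))
    (f := fun acc sub => pvFindLoop s sub (s.length + 2) 0 acc)
    (g := fun acc sub => acc ++ (pvOcc s sub 0).map (fun (i : Nat) => ((i : Int), pvVal sub)))
    (by
      intro acc sub hsub
      have := pvFindLoop_spec s sub (pv_subs_ne_nil sub hsub) (s.length + 2) 0 acc
        (Nat.zero_le _) (by omega)
      simpa using this)
  rw [h1, PySem.List.foldl_append_eq_flatMap]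
  simp

lemma pv_flatMap_comm {α β γ : Type} (l₁ : List α) (l₂ : List β) (F : α → β → List γ) :
    (l₁.flatMap fun a => l₂.flatMap fun b => F a b).Perm
      (l₂.flatMap fun b => l₁.flatMap fun a => F a b) := by
  rw [← Multiset.coe_eq_coe]
  simp only [← Multiset.coe_bind]
  exact Multiset.bind_bind _ _

lemma pv_filter_map_flatMap {α β : Type} (p : α → Bool) (f : α → β) (l : List α) :
    (l.filter p).map f = l.flatMap fun a => if p a then [f a] else [] := by
  induction l with
  | nil => rfl
  | cons a l ih => by_cases h : p a <;> simp [h, ih]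

lemma pv_perm (s : List Char) :
    (pvSubstrings.flatMap fun sub => (pvOcc s sub 0).map (fun (i : Nat) => ((i : Int), pvVal sub))).Perm
      (pvC s) := by
  have hL : ∀ sub : List Char,
      (pvOcc s sub 0).map (fun (i : Nat) => ((i : Int), pvVal sub))
        = (List.range s.length).flatMap
            (fun i => if PySem.Chars.startswith (List.drop i s) sub then [((i : Int), pvVal sub)] else []) := by
    intro sub
    rw [pvOcc]
    have : (List.range s.length).filter (fun i => 0 ≤ i && PySem.Chars.startswith (List.drop i s) sub)
        = (List.range s.length).filter (fun i => PySem.Chars.startswith (List.drop i s) sub) :=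
      List.filter_congr (by intro i _; simp)
    rw [this, pv_filter_map_flatMap]
  have hR : ∀ i : Nat,
      pvGroup s i = pvSubstrings.flatMap
        (fun sub => if PySem.Chars.startswith (List.drop i s) sub then [((i : Int), pvVal sub)] else []) := by
    intro i
    rw [pvGroup, pv_filter_map_flatMap]
  simp only [hL]
  rw [pvC, show pvGroup s = (fun i => pvSubstrings.flatMap
        (fun sub => if PySem.Chars.startswith (List.drop i s) sub then [((i : Int), pvVal sub)] else []))
      from funext hR]
  exact pv_flatMap_comm pvSubstrings (List.range s.length)
    (fun sub i => if PySem.Chars.startswith (List.drop i s) sub then [((i : Int), pvVal sub)] else [])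

lemma pv_pairwise (s : List Char) :
    (pvC s).Pairwise (fun a b => (toLex (a.1, a.2) : Lex (Int × Int)) < toLex (b.1, b.2)) := by
  rw [pvC, List.pairwise_flatMap]
  constructor
  · intro i _
    rcases pv_filter_single (l := pvSubstrings)
        (fun sub => PySem.Chars.startswith (List.drop i s) sub) pv_subs_nodup
        (pv_unique_match s i) with h | ⟨x, h⟩ <;> simp [pvGroup, h]
  · apply List.Pairwise.imp ?_ (List.pairwise_lt_range (n := s.length))
    intro i j hij a ha b hb
    have hai : a.1 = (i : Int) := by
      rcases List.mem_map.mp ha with ⟨x, _, hx⟩; rw [← hx]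
    have hbj : b.1 = (j : Int) := by
      rcases List.mem_map.mp hb with ⟨x, _, hx⟩; rw [← hx]
    rw [Prod.Lex.toLex_lt_toLex]
    left
    simp only [hai, hbj]
    exact_mod_cast hij

lemma pv_sorted2_lex (xs : List (Int × Int)) :
    PySem.List.sorted2 xs (fun p => p.1) (fun p => p.2)
      = PySem.List.sorted xs (fun p => (toLex (p.1, p.2) : Lex (Int × Int))) := by
  rw [PySem.List.sorted_eq_foldl_insertBy, PySem.List.sorted2]
  simp only [if_neg (by simp : ¬ (false = true))]
  congr 1
  funext acc x
  congr 1
  funext a b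
  rcases lt_trichotomy a.1 b.1 with h | h | h
  · simp [Prod.Lex.toLex_lt_toLex, h]
  · simp [Prod.Lex.toLex_lt_toLex, h]
  · simp [Prod.Lex.toLex_lt_toLex, h, not_lt_of_gt h]
    intro he
    omega

lemma pv_sorted (s : List Char) :
    PySem.List.sorted2
      (pvSubstrings.foldl (fun acc sub => pvFindLoop s sub (s.length + 2) 0 acc) [])
      (fun p => p.1) (fun p => p.2) = pvC s := by
  rw [pv_positions, pv_sorted2_lex]
  apply PySem.List.sorted_eq_of_perm_of_pairwise_lt
  · exact (pv_perm s).symm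
  · exact pv_pairwise s

lemma pv_firstPat (s : List Char) (i : Nat) :
    pvFirstPat s i pvPatterns
      = (pvSubstrings.find? (fun sub => PySem.Chars.startswith (List.drop i s) sub)).map pvVal := by
  rw [pv_patterns_eq]
  induction pvSubstrings with
  | nil => rfl
  | cons a l ih =>
    by_cases h : PySem.Chars.startswith (List.drop i s) a = true <;>
      simp [pvFirstPat, List.find?, h, ih]

lemma pv_join_nil (xss : List (List Char)) : PySem.Chars.join [] xss = xss.flatten := by
  induction xss with
  | nil => rfl
  | cons xs xss ih =>
    cases xss with
    | nil => simp [PySem.Chars.join, List.intercalate]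
    | cons ys yss =>
      simp only [PySem.Chars.join, List.intercalate] at ih ⊢
      simp [List.intersperse_cons₂, ih, List.flatten_cons]

lemma pv_group_chars (s : List Char) (i : Nat) :
    (pvGroup s i).flatMap (fun p => PySem.Int.toChars p.2)
      = ((pvSubstrings.find? (fun sub => PySem.Chars.startswith (List.drop i s) sub)).map pvVal).elim
          [] PySem.Int.toChars := by
  rw [← List.head?_filter]
  rcases pv_filter_single (l := pvSubstrings)
      (fun sub => PySem.Chars.startswith (List.drop i s) sub) pv_subs_nodup
      (pv_unique_match s i) with h | ⟨x, h⟩ <;> simp [pvGroup, h]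

lemma pv_B (s : List Char) :
    (List.range s.length).foldl (fun acc i =>
        match pvFirstPat s i pvPatterns with
        | some d => acc ++ PySem.Int.toChars d
        | none => acc) []
      = (List.range s.length).flatMap (fun i =>
          ((pvSubstrings.find? (fun sub => PySem.Chars.startswith (List.drop i s) sub)).map pvVal).elim
            [] PySem.Int.toChars) := by
  have h1 := PySem.List.foldl_congr_mem (l := List.range s.length)
    (init := ([] : List Char))
    (f := fun acc i =>
      match pvFirstPat s i pvPatterns with
      | some d => acc ++ PySem.Int.toChars d
      | none => acc)
    (g := fun acc i =>
      acc ++ ((pvSubstrings.find? (fun sub => PySem.Chars.startswith (List.drop i s) sub)).map pvVal).elim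
        [] PySem.Int.toChars)
    (by
      intro acc i _
      simp only [pv_firstPat]
      rcases (pvSubstrings.find? (fun sub => PySem.Chars.startswith (List.drop i s) sub)).map pvVal with _ | d <;> simp)
  rw [h1, PySem.List.foldl_append_eq_flatMap]
  simp

-- ===== VERDICT (by name: the statement is the Claim_ definition above) =====
theorem find_substrings_with_integers_spec : Claim_equal_find_substrings_with_integers := by
  intro string _
  unfold Spec_find_substrings_with_integers find_substrings_with_integers find_substrings_with_integers_alt
  simp only []
  rw [pv_sorted string.toList, pv_B string.toList]
  congr 1
  rw [pv_join_nil, ← List.flatMap_def, pvC, List.flatMap_assoc]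
  exact congrArg (fun f => List.flatMap f (List.range string.toList.length))
    (funext fun i => pv_group_chars string.toList i)
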